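-- pv_equiv track=rewrite | github.com/zagk/ComfyUI-Img-Label-Tools | nodes.py | _build_label_texts
-- ===== SOURCE A (Python) =====
-- def _build_label_texts(num_images, label_list, label_end):
--     """Build the list of label texts for all images"""
--     texts = []
--     for i in range(num_images):
--         label_text = ''
--         if label_list:
--             if label_end == 'loop':
--                 label_idx = i % len(label_list)
--                 label_text = label_list[label_idx]
--             else:  # end
--                 if i < len(label_list):
--                     label_text = label_list[i]
--         texts.append(label_text)
--     return texts
-- ===== SOURCE B (Python) =====
-- def _build_label_texts(num_images, label_list, label_end):
--     """Build the list of label texts for all images"""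
--     n = max(0, num_images)
--     if not label_list:
--         return [''] * n
--     L = len(label_list)
--     if label_end == 'loop':
--         # whole-list repetition, then slice to length
--         return (label_list * (n // L + 1))[:n]
--     # end mode: prefix of the labels, padded with '' (negative multiplier gives [])
--     return label_list[:n] + [''] * (n - L)
-- ===== Notes on version B (the rewrite author's own statement) =====
-- stated objective: simpler
-- what changed: Dispatches on label_end once at the whole-list level: empty list -> [''] * n, 'end' -> slice plus padding, 'loop' -> list repetition sliced to n, instead of a per-index loop with an inner mode branch.
import Mathlib
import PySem

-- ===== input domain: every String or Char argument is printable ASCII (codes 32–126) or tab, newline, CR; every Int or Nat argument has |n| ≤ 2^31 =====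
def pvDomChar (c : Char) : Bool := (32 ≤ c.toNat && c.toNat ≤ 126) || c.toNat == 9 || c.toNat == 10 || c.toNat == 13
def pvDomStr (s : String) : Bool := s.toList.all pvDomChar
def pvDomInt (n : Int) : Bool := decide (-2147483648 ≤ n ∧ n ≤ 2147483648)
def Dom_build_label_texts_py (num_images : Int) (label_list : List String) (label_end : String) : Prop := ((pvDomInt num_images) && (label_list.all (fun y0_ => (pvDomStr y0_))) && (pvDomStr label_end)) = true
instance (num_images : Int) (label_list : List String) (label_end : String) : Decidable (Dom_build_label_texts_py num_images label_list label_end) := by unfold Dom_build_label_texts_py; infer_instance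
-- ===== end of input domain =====

-- B dispatches on label_end once at the whole-list level (replicate / slice-and-pad / repetition), instead of A's per-index loop with an inner mode branch; same cost, simpler.

-- ===== PORT A =====
-- literal transliteration of A's index loop (indices are always in range, so pyGetD's default is never used)
def build_label_texts_py (num_images : Int) (label_list : List String) (label_end : String) : List String :=
  (PySem.List.pyRange 0 num_images 1).foldl (fun texts i =>
    let label_text : String := ""
    let label_text :=
      if label_list ≠ [] then
        if label_end == "loop" then
          let label_idx := PySem.Int.mod i (label_list.length : Int)
          PySem.List.pyGetD label_list label_idx ""
        else
          if i < (label_list.length : Int) then PySem.List.pyGetD label_list i ""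
          else label_text
      else label_text
    texts ++ [label_text]) []

-- ===== PORT B =====
def build_label_texts_py_alt (num_images : Int) (label_list : List String) (label_end : String) : List String :=
  let n := (max 0 num_images).toNat
  if label_list = [] then List.replicate n ""
  else
    let L := label_list.length
    if label_end == "loop" then
      ((List.replicate (n / L + 1) label_list).flatten).take n
    else
      label_list.take n ++ List.replicate (n - L) ""

-- ===== PRECONDITION & SPEC =====
def Spec_build_label_texts_py (num_images : Int) (label_list : List String) (label_end : String) (out : List String) : Prop := out = build_label_texts_py_alt num_images label_list label_end
instance (num_images : Int) (label_list : List String) (label_end : String) (out : List String) : Decidable (Spec_build_label_texts_py num_images label_list label_end out) := by unfold Spec_build_label_texts_py; infer_instance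

-- ===== CLAIM (what is proved, stated in full; the proofs are below) =====
def Claim_equal_build_label_texts_py : Prop := ∀ (num_images : Int) (label_list : List String) (label_end : String), Dom_build_label_texts_py num_images label_list label_end → Spec_build_label_texts_py num_images label_list label_end (build_label_texts_py num_images label_list label_end)

-- ===== LEMMAS AND PROOFS =====

-- A's loop is a map over range(num_images)
lemma pvA_eq_map (num_images : Int) (label_list : List String) (label_end : String) :
    build_label_texts_py num_images label_list label_end =
      (List.range num_images.toNat).map (fun (k : Nat) =>
        if label_list ≠ [] then
          if label_end == "loop" then
            PySem.List.pyGetD label_list (PySem.Int.mod (k : Int) (label_list.length : Int)) ""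
          else
            if (k : Int) < (label_list.length : Int) then PySem.List.pyGetD label_list (k : Int) ""
            else ""
        else "") := by
  unfold build_label_texts_py
  rw [PySem.List.pyRange_one, PySem.List.foldl_append_singleton_eq_map, List.map_map]
  simp only [Function.comp_def, zero_add, List.nil_append, Int.sub_zero]

lemma pvFlatRep_get? (label_list : List String) (m k : Nat) (hk : k < m * label_list.length) :
    ((List.replicate m label_list).flatten)[k]? = label_list[k % label_list.length]? := by
  induction m generalizing k with
  | zero => omega
  | succ m ih =>
    simp only [List.replicate_succ, List.flatten_cons]
    by_cases h : k < label_list.length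
    · rw [List.getElem?_append_left h, Nat.mod_eq_of_lt h]
    · have hL : label_list.length ≤ k := by omega
      rw [List.getElem?_append_right hL]
      have hrepr : k = label_list.length + (k - label_list.length) := by omega
      have hmul : (m + 1) * label_list.length = m * label_list.length + label_list.length := by ring
      rw [ih (k - label_list.length) (by omega)]
      conv_rhs => rw [hrepr]
      rw [Nat.add_mod_left]

theorem build_label_texts_py_spec_aux (num_images : Int) (label_list : List String) (label_end : String) :
    build_label_texts_py num_images label_list label_end = build_label_texts_py_alt num_images label_list label_end := by
  rw [pvA_eq_map]
  unfold build_label_texts_py_alt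
  have hn : (max 0 num_images).toNat = num_images.toNat := by omega
  rw [hn]
  by_cases hll : label_list = []
  · simp [hll]
  · rw [if_neg hll]
    simp only [hll, ne_eq, not_false_eq_true, if_true]
    have hLpos : 0 < label_list.length := List.length_pos_iff.mpr hll
    by_cases hle : (label_end == "loop") = true
    · simp only [hle, if_true]
      apply List.ext_getElem?
      intro k
      by_cases hk : k < num_images.toNat
      · have hkL : k % label_list.length < label_list.length := Nat.mod_lt _ hLpos
        rw [List.getElem?_take, if_pos hk, List.getElem?_map, List.getElem?_range hk]
        simp only [Option.map_some]
        rw [pvFlatRep_get? label_list (num_images.toNat / label_list.length + 1) k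
          (by
            have h1 := Nat.div_add_mod num_images.toNat label_list.length
            have h2 := Nat.mod_lt num_images.toNat hLpos
            have h3 : (num_images.toNat / label_list.length + 1) * label_list.length
                = label_list.length * (num_images.toNat / label_list.length) + label_list.length := by
              ring
            omega)]
        rw [PySem.Int.mod_natCast, PySem.List.pyGetD_natCast,
          List.getD_eq_getElem?_getD, List.getElem?_eq_getElem hkL]
        rfl
      · rw [List.getElem?_take, if_neg hk,
          List.getElem?_eq_none (by simpa using Nat.le_of_not_lt hk)]
    · simp only [hle, if_false, Bool.false_eq_true]
      apply List.ext_getElem?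
      intro k
      by_cases hk : k < num_images.toNat
      · rw [List.getElem?_map, List.getElem?_range hk]
        simp only [Option.map_some]
        by_cases hkL : k < label_list.length
        · rw [List.getElem?_append_left (by rw [List.length_take]; omega),
            List.getElem?_take, if_pos hk]
          have hcast : ((k : Int) < (label_list.length : Int)) := by exact_mod_cast hkL
          rw [if_pos hcast, PySem.List.pyGetD_natCast,
            List.getD_eq_getElem?_getD, List.getElem?_eq_getElem hkL]
          rfl
        · have hcast : ¬ ((k : Int) < (label_list.length : Int)) := by exact_mod_cast hkL
          rw [List.getElem?_append_right (by rw [List.length_take]; omega)]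
          rw [if_neg hcast, List.getElem?_replicate, List.length_take]
          rw [if_pos (by omega)]
      · rw [List.getElem?_eq_none (by simpa using Nat.le_of_not_lt hk),
          List.getElem?_eq_none
            (by rw [List.length_append, List.length_take, List.length_replicate]; omega)]

-- ===== VERDICT (by name: the statement is the Claim_ definition above) =====
theorem build_label_texts_py_spec : Claim_equal_build_label_texts_py := by
  intro num_images label_list label_end _
  exact build_label_texts_py_spec_aux num_images label_list label_end
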